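-- pv_equiv track=rewrite | github.com/yuzhou346694246/compilerimplement | lalrparse.py | lr2lalr
-- ===== SOURCE A (Python) =====
-- def lr2lalr(C):
--     slr = []
--     for itemlist in C:
--         slr.append([item[:-1] for item in itemlist])
--     indexs = {i:slr.index(s) for i,s in enumerate(slr)}
--     ret = {}
--     for k,v in indexs.items():
--         if v in ret:
--             for i in C[k]:
--                 if i not in ret[v]:
--                     t = ret[v]
--                     t.append(i)
--                     ret[v] = t
--         else:
--             ret[v] = C[k]
--     return list(ret.values())
-- ===== SOURCE B (Python) =====
-- def lr2lalr(C):
--     # Partition refinement: repeatedly take the first remaining itemlist as the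
--     # leader of its core-group, split the rest into same-core / other-core,
--     # merge the same-core items into the leader, and continue on the others.
--     # (Like A, the leader lists -- elements of C -- are extended in place.)
--     out = []
--     pending = list(C)
--     while pending:
--         head = pending[0]
--         core = [item[:-1] for item in head]
--         same, diff = [], []
--         for il in pending[1:]:
--             (same if [item[:-1] for item in il] == core else diff).append(il)
--         for il in same:
--             for item in il:
--                 if item not in head:
--                     head.append(item)
--         out.append(head)
--         pending = diff
--     return out
-- ===== Notes on version B (the rewrite author's own statement) =====
-- stated objective: alternative
-- what changed: Replaces A's staged pipeline (build the core list, build an index->first-index map via repeated list.index, regroup into a dict by leader index) with partition refinement: a worklist loop that extracts the first remaining itemlist as its group's leader, partitions the rest by core equality, merges the same-core lists into the leader, and recurses on the rest -- no core list, no index map, no dict.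
import Mathlib
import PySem

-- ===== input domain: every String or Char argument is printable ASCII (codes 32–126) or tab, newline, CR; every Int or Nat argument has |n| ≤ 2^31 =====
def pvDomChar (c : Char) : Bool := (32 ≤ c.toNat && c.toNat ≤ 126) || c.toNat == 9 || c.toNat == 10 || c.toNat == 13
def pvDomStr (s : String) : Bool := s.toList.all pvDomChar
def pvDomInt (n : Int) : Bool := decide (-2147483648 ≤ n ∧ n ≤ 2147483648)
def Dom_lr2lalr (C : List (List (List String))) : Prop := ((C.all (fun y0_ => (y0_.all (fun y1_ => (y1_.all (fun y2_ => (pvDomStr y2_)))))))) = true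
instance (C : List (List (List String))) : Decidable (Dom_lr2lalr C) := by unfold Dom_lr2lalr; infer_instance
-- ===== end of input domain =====

-- B replaces A's three-stage index-map grouping with partition refinement (extract the first
-- remaining itemlist as leader, split the rest by core equality, merge, recurse on the rest);
-- in Python both mutate C's inner lists — the equivalence proved here is about the return value.

-- ===== PORT A =====
def lr2lalr (C : List (List (List String))) : List (List (List String)) :=
  -- slr = [[item[:-1] for item in itemlist] for itemlist in C]
  let slr : List (List (List String)) :=
    C.map (fun itemlist => itemlist.map (fun item => PySem.List.slice item none (some (-1))))
  -- indexs = {i: slr.index(s) for i, s in enumerate(slr)}  (s ∈ slr, so list.index never raises; getD 0 unreachable)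
  let indexs : PySem.Dict Int Int :=
    (PySem.List.enumerate slr).foldl
      (fun d p => d.insert p.1 (((PySem.List.index? slr p.2).getD 0 : Nat) : Int)) PySem.Dict.empty
  -- ret = {}; for k, v in indexs.items(): …
  let ret : PySem.Dict Int (List (List String)) :=
    indexs.items.foldl
      (fun r kv =>
        if r.contains kv.2 then
          -- for i in C[k]: if i not in ret[v]: t = ret[v]; t.append(i); ret[v] = t
          (PySem.List.pyGetD C kv.1 []).foldl
            (fun r i =>
              if ((r.get? kv.2).getD []).contains i then r
              else r.insert kv.2 (((r.get? kv.2).getD []) ++ [i])) r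
        else r.insert kv.2 (PySem.List.pyGetD C kv.1 [])) PySem.Dict.empty
  ret.values

-- ===== PORT B =====
-- the 'while pending:' loop of Source B: state = (pending, out)
def lr2lalrAux (pending : List (List (List String))) (out : List (List (List String))) :
    List (List (List String)) :=
  match pending with
  | [] => out
  | head :: rest =>
      -- core = [item[:-1] for item in head]
      let core := head.map (fun item => PySem.List.slice item none (some (-1)))
      -- partition of pending[1:] into same / diff by core equality
      let same := rest.filter
        (fun il => il.map (fun item => PySem.List.slice item none (some (-1))) == core)
      let diff := rest.filter
        (fun il => !(il.map (fun item => PySem.List.slice item none (some (-1))) == core))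
      -- for il in same: for item in il: if item not in head: head.append(item)
      let merged := same.foldl
        (fun m il => il.foldl (fun m item => if m.contains item then m else m ++ [item]) m) head
      lr2lalrAux diff (out ++ [merged])
termination_by pending.length
decreasing_by
  simp only [List.length_unattach]
  exact Nat.lt_succ_of_le (le_trans (List.length_filter_le _ _) (le_of_eq List.length_attach))

def lr2lalr_alt (C : List (List (List String))) : List (List (List String)) :=
  lr2lalrAux C []

-- ===== PRECONDITION & SPEC =====
def Spec_lr2lalr (C : List (List (List String))) (out : List (List (List String))) : Prop := out = lr2lalr_alt C
instance (C : List (List (List String))) (out : List (List (List String))) : Decidable (Spec_lr2lalr C out) := by unfold Spec_lr2lalr; infer_instance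

-- ===== CLAIM (what is proved, stated in full; the proofs are below) =====
def Claim_equal_lr2lalr : Prop := ∀ (C : List (List (List String))), Dom_lr2lalr C → Spec_lr2lalr C (lr2lalr C)

-- ===== LEMMAS AND PROOFS =====

-- core of an itemlist, the core list slr, and A's first-occurrence index of a core
def pvcore (itemlist : List (List String)) : List (List String) :=
  itemlist.map (fun item => PySem.List.slice item none (some (-1)))
def pvidx (slr : List (List (List String))) (c : List (List String)) : Int :=
  (((PySem.List.index? slr c).getD 0 : Nat) : Int)
def pvF (slr : List (List (List String))) :
    (List (List String)) × (List (List String)) → Int × List (List String) :=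
  fun q => (pvidx slr q.1, q.2)
def pvmerge (t : List (List String)) (items : List (List String)) : List (List String) :=
  items.foldl (fun m item => if m.contains item then m else m ++ [item]) t
-- A's loop body and the dict-grouping loop body both proofs are routed through
def pvstepA (C : List (List (List String))) (r : PySem.Dict Int (List (List String)))
    (kv : Int × Int) : PySem.Dict Int (List (List String)) :=
  if r.contains kv.2 then
    (PySem.List.pyGetD C kv.1 []).foldl
      (fun r i =>
        if ((r.get? kv.2).getD []).contains i then r
        else r.insert kv.2 (((r.get? kv.2).getD []) ++ [i])) r
  else r.insert kv.2 (PySem.List.pyGetD C kv.1 [])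
def pvstepB (g : PySem.Dict (List (List String)) (List (List String)))
    (itemlist : List (List String)) : PySem.Dict (List (List String)) (List (List String)) :=
  match g.get? (pvcore itemlist) with
  | none => g.insert (pvcore itemlist) itemlist
  | some merged => g.insert (pvcore itemlist) (pvmerge merged itemlist)

theorem pv_idx_inj {slr : List (List (List String))} {c1 c2 : List (List String)}
    (h1 : c1 ∈ slr) (h2 : c2 ∈ slr) (h : pvidx slr c1 = pvidx slr c2) : c1 = c2 := by
  unfold pvidx PySem.List.index? at h
  obtain ⟨i1, hi1⟩ := Option.isSome_iff_exists.mp (List.isSome_idxOf?.mpr h1)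
  obtain ⟨i2, hi2⟩ := Option.isSome_iff_exists.mp (List.isSome_idxOf?.mpr h2)
  rw [hi1, hi2] at h
  obtain ⟨hl1, hg1, -⟩ := List.idxOf?_eq_some_iff.mp hi1
  obtain ⟨hl2, hg2, -⟩ := List.idxOf?_eq_some_iff.mp hi2
  have hii : i1 = i2 := by exact_mod_cast h
  subst hii
  rw [← hg1, ← hg2]

-- get? through the key-relabelled items list
theorem pv_get?_map {ps : List ((List (List String)) × (List (List String)))}
    {slr : List (List (List String))} {c : List (List String)}
    (hp : ∀ q ∈ ps, (pvidx slr q.1 == pvidx slr c) = (q.1 == c)) :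
    PySem.Dict.get? ⟨ps.map (pvF slr)⟩ (pvidx slr c) = PySem.Dict.get? ⟨ps⟩ c := by
  induction ps with
  | nil => simp [PySem.Dict.get?]
  | cons q ps ih =>
      rw [List.map_cons, show pvF slr q = (pvidx slr q.1, q.2) from rfl,
        PySem.Dict.get?_mk_cons, PySem.Dict.get?_mk_cons, hp q (List.mem_cons_self)]
      split
      · rfl
      · exact ih (fun q hq => hp q (List.mem_cons_of_mem _ hq))

theorem pv_insert_map {ps : List ((List (List String)) × (List (List String)))}
    {slr : List (List (List String))} {c : List (List String)} (w : List (List String))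
    (hp : ∀ q ∈ ps, (pvidx slr q.1 == pvidx slr c) = (q.1 == c)) :
    (PySem.Dict.insert ⟨ps.map (pvF slr)⟩ (pvidx slr c) w).items
      = (PySem.Dict.insert ⟨ps⟩ c w).items.map (pvF slr) := by
  have hcont : PySem.Dict.contains ⟨ps.map (pvF slr)⟩ (pvidx slr c)
      = PySem.Dict.contains (⟨ps⟩ : PySem.Dict _ _) c := by
    rw [PySem.Dict.contains_eq_isSome_get?, PySem.Dict.contains_eq_isSome_get?, pv_get?_map hp]
  cases hc : PySem.Dict.contains (⟨ps⟩ : PySem.Dict _ _) c with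
  | false =>
      rw [PySem.Dict.items_insert_of_not_contains _ _ (hcont.trans hc),
        PySem.Dict.items_insert_of_not_contains _ _ hc]
      simp [pvF]
  | true =>
      rw [PySem.Dict.items_insert_of_contains _ _ (hcont.trans hc),
        PySem.Dict.items_insert_of_contains _ _ hc]
      simp only [List.map_map]
      refine List.map_congr_left (fun q hq => ?_)
      simp only [Function.comp_apply, show pvF slr q = (pvidx slr q.1, q.2) from rfl, hp q hq]
      cases hqc : (q.1 == c) with
      | false => simp [pvF]
      | true => simp [pvF]

-- reinserting the value already present under a key (nodup keys) changes nothing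
theorem pv_insert_get?_self {κ ν : Type} [BEq κ] [LawfulBEq κ]
    (d : PySem.Dict κ ν) (k : κ) (t : ν) (hg : d.get? k = some t)
    (hn : (d.items.map Prod.fst).Nodup) : d.insert k t = d := by
  obtain ⟨ps⟩ := d
  have hc : PySem.Dict.contains (⟨ps⟩ : PySem.Dict κ ν) k = true := by
    rw [PySem.Dict.contains_eq_isSome_get?, hg]; rfl
  refine PySem.Dict.ext ?_
  rw [PySem.Dict.items_insert_of_contains _ _ hc]
  show ps.map _ = ps
  clear hc
  induction ps with
  | nil => rfl
  | cons q ps ih =>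
      simp only [List.map_cons, List.map_cons, List.nodup_cons] at hn ⊢
      rw [PySem.Dict.get?_mk_cons] at hg
      cases hq : (q.1 == k) with
      | true =>
          rw [hq] at hg
          have hk : q.1 = k := eq_of_beq hq
          have ht : t = q.2 := by simpa using hg.symm
          rw [if_pos rfl]
          refine congrArg₂ List.cons ?_ ?_
          · rw [ht, ← hk]
          · conv_rhs => rw [← List.map_id ps]
            refine List.map_congr_left (fun p hp => ?_)
            have hpk : p.1 ≠ k := by
              intro he
              refine hn.1 ?_
              rw [hk, ← he]
              exact List.mem_map_of_mem hp
            simp [beq_eq_false_iff_ne.mpr hpk]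
      | false =>
          have hg' : PySem.Dict.get? (⟨ps⟩ : PySem.Dict κ ν) k = some t := by simpa [hq] using hg
          rw [if_neg (by simp)]
          exact congrArg (List.cons q) (ih hg' hn.2)

-- overwriting an existing key leaves the key list unchanged
theorem pv_keys_insert_of_contains {κ ν : Type} [BEq κ] [LawfulBEq κ]
    (d : PySem.Dict κ ν) (k : κ) (w : ν) (hc : d.contains k = true) :
    (d.insert k w).items.map Prod.fst = d.items.map Prod.fst := by
  rw [PySem.Dict.items_insert_of_contains _ _ hc, List.map_map]
  refine List.map_congr_left (fun p hp => ?_)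
  by_cases h : (p.1 == k) = true
  · simp [eq_of_beq h]
  · simp [h]

-- A's inner merge loop equals one terminal insert of the merged list
theorem pv_inner_merge (items : List (List String))
    (d : PySem.Dict Int (List (List String))) (v : Int) (t : List (List String))
    (hg : d.get? v = some t) (hn : (d.items.map Prod.fst).Nodup) :
    items.foldl
      (fun r i =>
        if ((r.get? v).getD []).contains i then r
        else r.insert v (((r.get? v).getD []) ++ [i])) d
      = d.insert v (pvmerge t items) := by
  induction items generalizing d t with
  | nil => simpa [pvmerge] using (pv_insert_get?_self d v t hg hn).symm
  | cons i items ih =>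
      have hc : d.contains v = true := by
        rw [PySem.Dict.contains_eq_isSome_get?, hg]; rfl
      rw [List.foldl_cons]
      simp only [hg, Option.getD_some]
      by_cases hci : t.contains i = true
      · have hmem : i ∈ t := by simpa using hci
        rw [if_pos hci]
        rw [show pvmerge t (i :: items) = pvmerge t items by simp [pvmerge, hmem]]
        exact ih d t hg hn
      · rw [if_neg hci]
        have hg2 : (d.insert v (t ++ [i])).get? v = some (t ++ [i]) :=
          PySem.Dict.get?_insert_self d v (t ++ [i])
        have hn2 : ((d.insert v (t ++ [i])).items.map Prod.fst).Nodup := by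
          rw [pv_keys_insert_of_contains d v (t ++ [i]) hc]; exact hn
        have hmem : i ∉ t := by simpa using hci
        rw [ih _ _ hg2 hn2, PySem.Dict.insert_insert_self]
        rw [show pvmerge t (i :: items) = pvmerge (t ++ [i]) items by simp [pvmerge, hmem]]

theorem pv_enum_map {α β : Type} (f : α → β) (l : List α) (s : Int) :
    PySem.List.enumerate (l.map f) s = (PySem.List.enumerate l s).map (fun p => (p.1, f p.2)) := by
  induction l generalizing s with
  | nil => simp [PySem.List.enumerate]
  | cons x l ih => simp [PySem.List.enumerate, ih]

-- main simulation: A's regroup loop tracks the dict-grouping loop through pvF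
theorem pv_main (C : List (List (List String))) (Cs : List (List (List String))) (start : Nat)
    (hdrop : C.drop start = Cs)
    (gB : PySem.Dict (List (List String)) (List (List String)))
    (hmem : ∀ q ∈ gB.items, q.1 ∈ C.map pvcore)
    (hnd : (gB.items.map Prod.fst).Nodup) :
    (((PySem.List.enumerate Cs (start : Int)).map
        (fun p => (p.1, pvidx (C.map pvcore) (pvcore p.2)))).foldl (pvstepA C)
        ⟨gB.items.map (pvF (C.map pvcore))⟩)
      = ⟨(Cs.foldl pvstepB gB).items.map (pvF (C.map pvcore))⟩
    ∧ (∀ q ∈ (Cs.foldl pvstepB gB).items, q.1 ∈ C.map pvcore)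
    ∧ ((Cs.foldl pvstepB gB).items.map Prod.fst).Nodup := by
  induction Cs generalizing start gB with
  | nil =>
      simp only [PySem.List.enumerate, List.map_nil, List.foldl_nil]
      exact ⟨trivial, hmem, hnd⟩
  | cons il Cs ih =>
      have hGB : (⟨gB.items⟩ : PySem.Dict (List (List String)) (List (List String))) = gB := by
        cases gB; rfl
      have hget : C[start]? = some il := by
        have h0 : (C.drop start)[0]? = some il := by rw [hdrop]; rfl
        rwa [List.getElem?_drop] at h0
      have hdrop' : C.drop (start + 1) = Cs := by
        have := congrArg (List.drop 1) hdrop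
        rwa [List.drop_drop] at this
      have hil : il ∈ C := List.mem_of_getElem? hget
      have hcmem : pvcore il ∈ C.map pvcore := List.mem_map_of_mem hil
      have hp : ∀ q ∈ gB.items,
          (pvidx (C.map pvcore) q.1 == pvidx (C.map pvcore) (pvcore il)) = (q.1 == pvcore il) := by
        intro q hq
        by_cases he : q.1 = pvcore il
        · simp [he]
        · have hne : pvidx (C.map pvcore) q.1 ≠ pvidx (C.map pvcore) (pvcore il) :=
            fun hco => he (pv_idx_inj (hmem q hq) hcmem hco)
          rw [beq_eq_false_iff_ne.mpr he, beq_eq_false_iff_ne.mpr hne]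
      have hget? : (⟨gB.items.map (pvF (C.map pvcore))⟩ :
            PySem.Dict Int (List (List String))).get? (pvidx (C.map pvcore) (pvcore il))
          = gB.get? (pvcore il) := by rw [pv_get?_map hp, hGB]
      have hCg : PySem.List.pyGetD C (start : Int) [] = il := by
        rw [PySem.List.pyGetD_natCast, List.getD_eq_getElem?_getD, hget]; rfl
      rw [PySem.List.enumerate_cons, List.map_cons, List.foldl_cons, List.foldl_cons]
      have hcast : ((start : Int) + 1) = ((start + 1 : Nat) : Int) := by push_cast; ring
      cases hgg : gB.get? (pvcore il) with
      | none =>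
          have hcf : gB.contains (pvcore il) = false := by
            rw [PySem.Dict.contains_eq_isSome_get?, hgg]; rfl
          have hstepA : pvstepA C ⟨gB.items.map (pvF (C.map pvcore))⟩
                ((start : Int), pvidx (C.map pvcore) (pvcore il))
              = ⟨(gB.insert (pvcore il) il).items.map (pvF (C.map pvcore))⟩ := by
            unfold pvstepA
            rw [if_neg (by
              rw [PySem.Dict.contains_eq_isSome_get?]
              show ((⟨gB.items.map (pvF (C.map pvcore))⟩ : PySem.Dict Int _).get? _).isSome ≠ true
              rw [hget?, hgg]; simp)]
            refine PySem.Dict.ext ?_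
            rw [hCg]
            rw [show (PySem.Dict.insert ⟨gB.items.map (pvF (C.map pvcore))⟩
                  (pvidx (C.map pvcore) (pvcore il)) il).items
                = (PySem.Dict.insert ⟨gB.items⟩ (pvcore il) il).items.map (pvF (C.map pvcore))
              from pv_insert_map il hp, hGB]
          have hstepB : pvstepB gB il = gB.insert (pvcore il) il := by
            unfold pvstepB; rw [hgg]
          have hmem' : ∀ q ∈ (gB.insert (pvcore il) il).items, q.1 ∈ C.map pvcore := by
            intro q hq
            rw [PySem.Dict.items_insert_of_not_contains _ _ hcf] at hq
            rcases List.mem_append.mp hq with h | h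
            · exact hmem q h
            · simp only [List.mem_singleton] at h; rw [h]; exact hcmem
          have hnd' : ((gB.insert (pvcore il) il).items.map Prod.fst).Nodup := by
            rw [PySem.Dict.items_insert_of_not_contains _ _ hcf, List.map_append]
            refine List.Nodup.append hnd (by simp) ?_
            intro x hx hy
            simp only [List.map_cons, List.map_nil, List.mem_singleton] at hy
            have hk : pvcore il ∉ gB.keys :=
              (PySem.Dict.get?_eq_none_iff_not_mem_keys gB (pvcore il)).mp hgg
            rw [PySem.Dict.keys.eq_1] at hk
            exact hk (by rw [← hy]; exact hx)
          rw [hstepA, hstepB, hcast]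
          exact ih (start + 1) hdrop' (gB.insert (pvcore il) il) hmem' hnd'
      | some merged =>
          have hct : gB.contains (pvcore il) = true := by
            rw [PySem.Dict.contains_eq_isSome_get?, hgg]; rfl
          have hndA : (((⟨gB.items.map (pvF (C.map pvcore))⟩ :
                PySem.Dict Int (List (List String))).items.map Prod.fst)).Nodup := by
            show ((gB.items.map (pvF (C.map pvcore))).map Prod.fst).Nodup
            rw [List.map_map]
            rw [show (Prod.fst ∘ pvF (C.map pvcore))
                = (pvidx (C.map pvcore)) ∘ Prod.fst from rfl, ← List.map_map]
            refine List.Nodup.map_on ?_ hnd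
            intro x hx y hy hxy
            obtain ⟨qx, hqx, hqx'⟩ := List.mem_map.mp hx
            obtain ⟨qy, hqy, hqy'⟩ := List.mem_map.mp hy
            exact pv_idx_inj (hqx' ▸ hmem qx hqx) (hqy' ▸ hmem qy hqy) hxy
          have hstepA : pvstepA C ⟨gB.items.map (pvF (C.map pvcore))⟩
                ((start : Int), pvidx (C.map pvcore) (pvcore il))
              = ⟨(gB.insert (pvcore il) (pvmerge merged il)).items.map (pvF (C.map pvcore))⟩ := by
            unfold pvstepA
            rw [if_pos (by
              rw [PySem.Dict.contains_eq_isSome_get?]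
              show ((⟨gB.items.map (pvF (C.map pvcore))⟩ : PySem.Dict Int _).get? _).isSome = true
              rw [hget?, hgg]; rfl)]
            rw [hCg]
            rw [pv_inner_merge il _ _ merged (by rw [hget?, hgg]) hndA]
            refine PySem.Dict.ext ?_
            rw [show (PySem.Dict.insert ⟨gB.items.map (pvF (C.map pvcore))⟩
                  (pvidx (C.map pvcore) (pvcore il)) (pvmerge merged il)).items
                = (PySem.Dict.insert ⟨gB.items⟩ (pvcore il) (pvmerge merged il)).items.map
                    (pvF (C.map pvcore))
              from pv_insert_map (pvmerge merged il) hp, hGB]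
          have hstepB : pvstepB gB il = gB.insert (pvcore il) (pvmerge merged il) := by
            unfold pvstepB; rw [hgg]
          have hmem' : ∀ q ∈ (gB.insert (pvcore il) (pvmerge merged il)).items,
              q.1 ∈ C.map pvcore := by
            intro q hq
            rw [PySem.Dict.items_insert_of_contains _ _ hct] at hq
            obtain ⟨p, hpm, hpe⟩ := List.mem_map.mp hq
            by_cases h : (p.1 == pvcore il) = true
            · rw [← hpe]; simp only [h, if_pos]; exact hcmem
            · rw [← hpe]; simp only [h]; simpa using hmem p hpm
          have hnd' : ((gB.insert (pvcore il) (pvmerge merged il)).items.map Prod.fst).Nodup := by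
            rw [pv_keys_insert_of_contains _ _ _ hct]; exact hnd
          rw [hstepA, hstepB, hcast]
          exact ih (start + 1) hdrop' (gB.insert (pvcore il) (pvmerge merged il)) hmem' hnd'

-- A equals the dict-grouping fold (the old simulation, packaged)
theorem pv_A_eq_dict (C : List (List (List String))) :
    lr2lalr C = (C.foldl pvstepB PySem.Dict.empty).values := by
  have hnodup : (List.map (fun p => p.1)
      (PySem.List.enumerate (C.map pvcore) 0)).Nodup := by
    refine List.Pairwise.imp (fun h => ne_of_lt h) ?_
    exact List.Pairwise.map _ (fun a b h => h) (PySem.List.pairwise_lt_enumerate (C.map pvcore) 0)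
  have hidx : (List.foldl
        (fun d p => d.insert p.1 (((PySem.List.index? (C.map pvcore) p.2).getD 0 : Nat) : Int))
        PySem.Dict.empty (PySem.List.enumerate (C.map pvcore) 0)).items
      = List.map (fun p => (p.1, pvidx (C.map pvcore) (pvcore p.2)))
          (PySem.List.enumerate C 0) := by
    rw [PySem.Dict.items_foldl_insert_fresh (PySem.List.enumerate (C.map pvcore) 0)
      (fun p => p.1) (fun p => (((PySem.List.index? (C.map pvcore) p.2).getD 0 : Nat) : Int))
      PySem.Dict.empty (fun a _ => PySem.Dict.contains_empty a.1) hnodup]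
    rw [pv_enum_map pvcore C 0, List.map_map]
    rfl
  have hmain := (pv_main C C 0 rfl PySem.Dict.empty
    (fun q hq => absurd hq (by simp [PySem.Dict.empty.eq_1]))
    (by simp [PySem.Dict.empty.eq_1])).1
  have hfold : List.foldl (pvstepA C) PySem.Dict.empty
        (List.map (fun p => (p.1, pvidx (C.map pvcore) (pvcore p.2)))
          (PySem.List.enumerate C 0))
      = ⟨(C.foldl pvstepB PySem.Dict.empty).items.map (pvF (C.map pvcore))⟩ := hmain
  unfold lr2lalr
  dsimp only
  rw [show (C.map (fun itemlist => itemlist.map (fun item =>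
        PySem.List.slice item none (some (-1))))) = C.map pvcore from rfl]
  rw [hidx]
  rw [show (fun (r : PySem.Dict Int (List (List String))) (kv : Int × Int) =>
        if r.contains kv.2 then
          (PySem.List.pyGetD C kv.1 []).foldl
            (fun r i =>
              if ((r.get? kv.2).getD []).contains i then r
              else r.insert kv.2 (((r.get? kv.2).getD []) ++ [i])) r
        else r.insert kv.2 (PySem.List.pyGetD C kv.1 [])) = pvstepA C from rfl]
  rw [hfold]
  rw [PySem.Dict.values_mk, List.map_map]
  rfl

-- stepping the dict-grouping fold with a non-matching core leaves the head entry alone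
theorem pv_stepB_other (ps : List ((List (List String)) × (List (List String))))
    (c : List (List String)) (t : List (List String)) (il : List (List String))
    (hne : pvcore il ≠ c) :
    pvstepB ⟨(c, t) :: ps⟩ il = ⟨(c, t) :: (pvstepB ⟨ps⟩ il).items⟩ := by
  have hbeq : (c == pvcore il) = false := beq_eq_false_iff_ne.mpr (fun h => hne h.symm)
  have hget : PySem.Dict.get? (⟨(c, t) :: ps⟩ : PySem.Dict _ _) (pvcore il)
      = PySem.Dict.get? (⟨ps⟩ : PySem.Dict _ _) (pvcore il) := by
    rw [PySem.Dict.get?_mk_cons, hbeq]; rfl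
  unfold pvstepB
  rw [hget]
  cases hg : PySem.Dict.get? (⟨ps⟩ : PySem.Dict _ _) (pvcore il) with
  | none =>
      have hcf : PySem.Dict.contains (⟨ps⟩ : PySem.Dict _ _) (pvcore il) = false := by
        rw [PySem.Dict.contains_eq_isSome_get?, hg]; rfl
      have hcf2 : PySem.Dict.contains (⟨(c, t) :: ps⟩ : PySem.Dict _ _) (pvcore il) = false := by
        rw [PySem.Dict.contains_eq_isSome_get?, hget, hg]; rfl
      refine PySem.Dict.ext ?_
      rw [PySem.Dict.items_insert_of_not_contains _ _ hcf2]
      show ((c, t) :: ps) ++ [(pvcore il, il)] = (c, t) :: (PySem.Dict.insert ⟨ps⟩ _ il).items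
      rw [PySem.Dict.items_insert_of_not_contains _ _ hcf]
      rfl
  | some merged =>
      have hct : PySem.Dict.contains (⟨ps⟩ : PySem.Dict _ _) (pvcore il) = true := by
        rw [PySem.Dict.contains_eq_isSome_get?, hg]; rfl
      have hct2 : PySem.Dict.contains (⟨(c, t) :: ps⟩ : PySem.Dict _ _) (pvcore il) = true := by
        rw [PySem.Dict.contains_eq_isSome_get?, hget, hg]; rfl
      refine PySem.Dict.ext ?_
      rw [PySem.Dict.items_insert_of_contains _ _ hct2,
        PySem.Dict.items_insert_of_contains _ _ hct]
      show ((c, t) :: ps).map _ = (c, t) :: ps.map _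
      rw [List.map_cons]
      simp only [hbeq]
      rfl

-- stepping with the matching core updates the head entry (when c is not a key of the tail)
theorem pv_stepB_same (ps : List ((List (List String)) × (List (List String))))
    (c : List (List String)) (t : List (List String)) (il : List (List String))
    (heq : pvcore il = c) (hkeys : c ∉ ps.map Prod.fst) :
    pvstepB ⟨(c, t) :: ps⟩ il = ⟨(c, pvmerge t il) :: ps⟩ := by
  have hget : PySem.Dict.get? (⟨(c, t) :: ps⟩ : PySem.Dict _ _) (pvcore il) = some t := by
    rw [PySem.Dict.get?_mk_cons, heq, beq_self_eq_true]; rfl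
  have hct : PySem.Dict.contains (⟨(c, t) :: ps⟩ : PySem.Dict _ _) (pvcore il) = true := by
    rw [PySem.Dict.contains_eq_isSome_get?, hget]; rfl
  unfold pvstepB
  rw [hget]
  refine PySem.Dict.ext ?_
  rw [PySem.Dict.items_insert_of_contains _ _ hct]
  show ((c, t) :: ps).map _ = (c, pvmerge t il) :: ps
  rw [List.map_cons]
  rw [show ((c, t).1 == pvcore il) = true by rw [heq]; exact beq_self_eq_true c, if_pos rfl]
  refine congrArg₂ List.cons (by rw [heq]) ?_
  conv_rhs => rw [← List.map_id ps]
  refine List.map_congr_left (fun p hp => ?_)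
  have hpk : p.1 ≠ pvcore il := by
    rw [heq]; intro he; exact hkeys (he ▸ List.mem_map_of_mem hp)
  simp [beq_eq_false_iff_ne.mpr hpk]

-- a missing key other than the new core stays missing after one step
theorem pv_stepB_keys (g : PySem.Dict (List (List String)) (List (List String)))
    (il : List (List String)) (c : List (List String))
    (hne : c ≠ pvcore il) (hk : c ∉ g.items.map Prod.fst) :
    c ∉ (pvstepB g il).items.map Prod.fst := by
  unfold pvstepB
  cases hg : g.get? (pvcore il) with
  | none =>
      have hcf : g.contains (pvcore il) = false := by
        rw [PySem.Dict.contains_eq_isSome_get?, hg]; rfl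
      rw [PySem.Dict.items_insert_of_not_contains _ _ hcf, List.map_append]
      intro hmem
      rcases List.mem_append.mp hmem with h | h
      · exact hk h
      · simp only [List.map_cons, List.map_nil, List.mem_singleton] at h
        exact hne h
  | some merged =>
      have hct : g.contains (pvcore il) = true := by
        rw [PySem.Dict.contains_eq_isSome_get?, hg]; rfl
      rw [pv_keys_insert_of_contains _ _ _ hct]
      exact hk

-- partition lemma: folding the rest over a dict whose first entry has key c splits into
-- merging the same-core itemlists into that entry and folding the others over the tail
theorem pv_partition (rest : List (List (List String)))
    (c : List (List String)) (t : List (List String))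
    (ps : List ((List (List String)) × (List (List String))))
    (hkeys : c ∉ ps.map Prod.fst) :
    (rest.foldl pvstepB ⟨(c, t) :: ps⟩).items
      = (c, rest.foldl (fun m il => if pvcore il == c then pvmerge m il else m) t)
        :: ((rest.filter (fun il => !(pvcore il == c))).foldl pvstepB ⟨ps⟩).items := by
  induction rest generalizing t ps with
  | nil => simp
  | cons il rest ih =>
      rw [List.foldl_cons]
      by_cases heq : pvcore il = c
      · rw [pv_stepB_same ps c t il heq hkeys]
        rw [List.filter_cons_of_neg (by simp [heq])]
        rw [show (il :: rest).foldl (fun m il => if pvcore il == c then pvmerge m il else m) t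
            = rest.foldl (fun m il => if pvcore il == c then pvmerge m il else m)
                (pvmerge t il) by
          rw [List.foldl_cons, if_pos (by rw [heq]; exact beq_self_eq_true c)]]
        exact ih (pvmerge t il) ps hkeys
      · rw [pv_stepB_other ps c t il heq]
        rw [show (il :: rest).foldl (fun m il => if pvcore il == c then pvmerge m il else m) t
            = rest.foldl (fun m il => if pvcore il == c then pvmerge m il else m) t by
          rw [List.foldl_cons, if_neg (by simp [heq])]]
        rw [List.filter_cons_of_pos (by simp [heq]), List.foldl_cons]
        have hkeys' : c ∉ (pvstepB ⟨ps⟩ il).items.map Prod.fst :=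
          pv_stepB_keys ⟨ps⟩ il c (fun h => heq h.symm) hkeys
        have := ih t (pvstepB ⟨ps⟩ il).items hkeys'
        rwa [show (⟨(pvstepB ⟨ps⟩ il).items⟩ :
            PySem.Dict (List (List String)) (List (List String))) = pvstepB ⟨ps⟩ il by
          cases hq : pvstepB ⟨ps⟩ il; rfl] at this

-- the worklist loop of B computes the values of the dict-grouping fold
theorem pv_aux_eq_dict_n (n : Nat) : ∀ pending out : List (List (List String)),
    pending.length ≤ n →
    lr2lalrAux pending out = out ++ (pending.foldl pvstepB PySem.Dict.empty).values := by
  induction n with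
  | zero =>
      intro pending out h
      have hnil : pending = [] := List.eq_nil_of_length_eq_zero (Nat.le_zero.mp h)
      subst hnil
      rw [lr2lalrAux]
      simp [PySem.Dict.empty.eq_1, PySem.Dict.values]
  | succ n ihn =>
      intro pending out h
      cases pending with
      | nil =>
          rw [lr2lalrAux]
          simp [PySem.Dict.empty.eq_1, PySem.Dict.values]
      | cons hd tl =>
          rw [lr2lalrAux]
          show lr2lalrAux (tl.filter (fun il => !(pvcore il == pvcore hd)))
              (out ++ [(tl.filter (fun il => pvcore il == pvcore hd)).foldl
                (fun m il => pvmerge m il) hd])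
            = out ++ ((hd :: tl).foldl pvstepB PySem.Dict.empty).values
          have hlen : (tl.filter (fun il => !(pvcore il == pvcore hd))).length ≤ n :=
            le_trans (List.length_filter_le _ _) (Nat.le_of_succ_le_succ h)
          rw [ihn _ _ hlen]
          have hstep0 : pvstepB PySem.Dict.empty hd = ⟨[(pvcore hd, hd)]⟩ := by
            unfold pvstepB
            rw [show PySem.Dict.get? (PySem.Dict.empty :
                PySem.Dict (List (List String)) (List (List String))) (pvcore hd) = none from rfl]
            rfl
          have hvals : ((hd :: tl).foldl pvstepB PySem.Dict.empty).values
              = (tl.foldl (fun m il => if pvcore il == pvcore hd then pvmerge m il else m) hd)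
                :: ((tl.filter (fun il => !(pvcore il == pvcore hd))).foldl
                    pvstepB PySem.Dict.empty).values := by
            rw [List.foldl_cons, hstep0]
            show (List.foldl pvstepB ⟨(pvcore hd, hd) :: []⟩ tl).items.map Prod.snd = _
            rw [pv_partition tl (pvcore hd) hd [] (by simp)]
            rfl
          rw [hvals]
          rw [show (tl.filter (fun il => pvcore il == pvcore hd)).foldl
                (fun m il => pvmerge m il) hd
              = tl.foldl (fun m il => if pvcore il == pvcore hd then pvmerge m il else m) hd from
            List.foldl_filter ..]
          simp

-- ===== VERDICT (by name: the statement is the Claim_ definition above) =====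
theorem lr2lalr_spec : Claim_equal_lr2lalr := by
  intro C _
  show lr2lalr C = lr2lalr_alt C
  rw [pv_A_eq_dict, lr2lalr_alt, pv_aux_eq_dict_n C.length C [] le_rfl, List.nil_append]
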